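-- pv_equiv track=rewrite | github.com/OliyadM/A2SV_CP | A2SV G6 - Round #2 21-Feb-2025/C - The Splitting Game 279977.py | splitt
-- ===== SOURCE A (Python) =====
-- def splitt(string):
--     if not string:
--         return 0
--     maximum=1
--     for i in range(len(string)-1):
--         first=string[:i+1]
--         last=string[i+1:]
--         cur_max=len(set(first))+len(set(last))
--         maximum=max(maximum,cur_max)
--     return maximum
-- ===== SOURCE B (Python) =====
-- def splitt(string):
--     if not string:
--         return 0
--     pre = []
--     seen = set()
--     for ch in string:
--         seen.add(ch)
--         pre.append(len(seen))
--     suf = []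
--     seen = set()
--     for ch in reversed(string):
--         seen.add(ch)
--         suf.append(len(seen))
--     suf.reverse()
--     best = 1
--     for i in range(len(string) - 1):
--         best = max(best, pre[i] + suf[i + 1])
--     return best
-- ===== Notes on version B (the rewrite author's own statement) =====
-- stated objective: faster
-- what changed: Instead of rebuilding set(prefix) and set(suffix) from scratch at every split point, B precomputes prefix and suffix distinct-character counts in two linear scans and takes the max of pre[i]+suf[i+1] in one pass.
import Mathlib
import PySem

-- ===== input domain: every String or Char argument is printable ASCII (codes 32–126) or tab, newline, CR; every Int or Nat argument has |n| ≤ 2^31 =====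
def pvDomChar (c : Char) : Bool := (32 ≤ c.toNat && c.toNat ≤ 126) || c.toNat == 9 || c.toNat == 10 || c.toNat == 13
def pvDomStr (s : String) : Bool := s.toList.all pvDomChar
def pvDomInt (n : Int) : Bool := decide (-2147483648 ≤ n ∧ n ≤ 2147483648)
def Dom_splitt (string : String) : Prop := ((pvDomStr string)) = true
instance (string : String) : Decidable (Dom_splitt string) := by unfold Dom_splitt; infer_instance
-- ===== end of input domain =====

-- B replaces A's per-split set(prefix)/set(suffix) rebuilds by two linear scans of
-- prefix/suffix distinct-character counts plus one max pass (objective: faster).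

-- ===== PORT A =====
def splitt (string : String) : Int :=
  if string.toList = [] then 0
  else
    (PySem.List.pyRange 0 ((string.toList.length : Int) - 1) 1).foldl
      (fun maximum i =>
        let first := PySem.List.slice string.toList none (some (i + 1))
        let last := PySem.List.slice string.toList (some (i + 1)) none
        let cur_max : Int := ((PySem.Set.ofList first).length : Int) + ((PySem.Set.ofList last).length : Int)
        max maximum cur_max)
      1

-- ===== PORT B =====
-- one scan: seen-set accumulator, list of running distinct counts (Source B's pre/suf loops)
def pvScanCounts (cs : List Char) : List Int :=
  (cs.foldl (fun st ch =>
      let seen := PySem.Set.add st.1 ch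
      (seen, st.2 ++ [(seen.length : Int)]))
    ((PySem.Set.empty : PySem.Set Char), ([] : List Int))).2

def splitt_alt (string : String) : Int :=
  let cs := string.toList
  if cs = [] then 0
  else
    let pre := pvScanCounts cs
    let suf := (pvScanCounts cs.reverse).reverse
    (PySem.List.pyRange 0 ((cs.length : Int) - 1) 1).foldl
      (fun best i => max best (PySem.List.pyGetD pre i 0 + PySem.List.pyGetD suf (i + 1) 0))
      1

-- ===== PRECONDITION & SPEC =====
def Spec_splitt (string : String) (out : Int) : Prop := out = splitt_alt string
instance (string : String) (out : Int) : Decidable (Spec_splitt string out) := by unfold Spec_splitt; infer_instance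

-- ===== CLAIM (what is proved, stated in full; the proofs are below) =====
def Claim_equal_splitt : Prop := ∀ (string : String), Dom_splitt string → Spec_splitt string (splitt string)

-- ===== LEMMAS AND PROOFS =====

-- distinct-count of a list as a Finset card (order-free form used to link the two ports)
theorem pvSetLen_eq_card (xs : List Char) :
    (PySem.Set.ofList xs).length = xs.toFinset.card := by
  rw [← List.toFinset_card_of_nodup (PySem.Set.nodup_ofList xs)]
  congr 1
  ext c
  simp [PySem.Set.mem_ofList]

-- the scan's invariant: accumulator = set of chars seen, output = running distinct counts
theorem pvScanPair_eq (cs : List Char) :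
    cs.foldl (fun st ch =>
        let seen := PySem.Set.add st.1 ch
        (seen, st.2 ++ [(seen.length : Int)]))
      ((PySem.Set.empty : PySem.Set Char), ([] : List Int))
    = (PySem.Set.ofList cs,
       (List.range cs.length).map (fun k => ((cs.take (k + 1)).toFinset.card : Int))) := by
  induction cs using List.reverseRecOn with
  | nil => rfl
  | append_singleton cs c ih =>
    rw [List.foldl_append, ih]
    simp only [List.foldl_cons, List.foldl_nil]
    refine Prod.ext ?_ ?_
    · simp [PySem.Set.ofList_append_singleton]
    · simp only [List.length_append, List.length_singleton, List.range_succ, List.map_append,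
        List.map_cons, List.map_nil]
      congr 1
      · refine List.map_congr_left (fun k hk => ?_)
        rw [List.take_append_of_le_length (by simpa using List.mem_range.mp hk)]
      · rw [← PySem.Set.ofList_append_singleton, pvSetLen_eq_card,
          List.take_of_length_le (by simp)]

theorem pvScanCounts_eq (cs : List Char) :
    pvScanCounts cs
    = (List.range cs.length).map (fun k => ((cs.take (k + 1)).toFinset.card : Int)) :=
  congrArg Prod.snd (pvScanPair_eq cs)

-- at split index k: A's set(prefix)/set(suffix) sizes = B's precomputed pre[k] / suf[k+1]
theorem pvBody_eq (cs : List Char) (k : Nat) (hk : k + 1 < cs.length) :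
    ((PySem.Set.ofList (PySem.List.slice cs none (some ((k : Int) + 1)))).length : Int)
      + ((PySem.Set.ofList (PySem.List.slice cs (some ((k : Int) + 1)) none)).length : Int)
    = PySem.List.pyGetD (pvScanCounts cs) (k : Int) 0
      + PySem.List.pyGetD ((pvScanCounts cs.reverse).reverse) ((k : Int) + 1) 0 := by
  have hc : ((k : Int) + 1) = ((k + 1 : Nat) : Int) := by push_cast; ring
  rw [hc, PySem.List.slice_to_natCast, PySem.List.slice_from_natCast,
      PySem.List.pyGetD_natCast, PySem.List.pyGetD_natCast,
      pvScanCounts_eq, pvScanCounts_eq,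
      PySem.List.getD_map_range _ _ _ _ (by omega : k < cs.length)]
  rw [List.getD_eq_getElem _ _ (by simp; omega)]
  rw [List.getElem_reverse]
  simp only [List.length_map, List.length_range, List.getElem_map, List.getElem_range,
    List.length_reverse]
  rw [pvSetLen_eq_card, pvSetLen_eq_card]
  congr 2
  have h1 : cs.length - 1 - (k + 1) + 1 = cs.length - (k + 1) := by omega
  rw [h1, ← List.reverse_drop, List.toFinset_reverse]

-- ===== VERDICT (by name: the statement is the Claim_ definition above) =====
theorem splitt_spec : Claim_equal_splitt := by
  intro string _
  unfold Spec_splitt splitt splitt_alt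
  by_cases h : string.toList = []
  · simp [h]
  · rw [if_neg h, if_neg h]
    apply PySem.List.foldl_congr_mem
    intro acc i hi
    obtain ⟨h0, h1⟩ := (PySem.List.mem_pyRange_one).mp hi
    obtain ⟨k, rfl⟩ := Int.eq_ofNat_of_zero_le h0
    have hk : k + 1 < string.toList.length := by omega
    simp only []
    rw [pvBody_eq string.toList k hk]
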